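-- pv_equiv track=rewrite | github.com/doobMM/hibari_tda | tda_pipeline/preprocessing.py | prepare_lag_sequences
-- ===== SOURCE A (Python) =====
-- def prepare_lag_sequences(chord_seq_1: list, chord_seq_2: list,
--                           solo_timepoints: int = 32, max_lag: int = 4,
--                           inst1_front_pad: int = 16) -> dict:
--     """
--     두 악기의 화음 시퀀스를 lag별로 정렬하여 반환합니다.
--     기존 get_ready_with_lags를 정확히 재현합니다.
--
--     Args:
--         chord_seq_1: inst 1의 화음 레이블 시퀀스 (시점당 1개)
--         chord_seq_2: inst 2의 화음 레이블 시퀀스 (시점당 1개)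
--         solo_timepoints: 솔로 구간의 시점 수 (4마디 × 8 eighth = 32)
--                          ※ 음표 개수(59)가 아님에 주의
--         max_lag: 최대 lag 값 (기본 4)
--         inst1_front_pad: inst1 lag 시퀀스 앞쪽 패딩 값 (hibari에서는 16)
--
--     Returns:
--         adn_i[1][0] = inst1 전체 화음 시퀀스
--         adn_i[1][1] = inst1 lag=1 시퀀스 (겹치는 구간만)
--         adn_i[1][2] = inst1 lag=2 시퀀스 (패딩 추가)
--         ...
--         adn_i[1][-1] = inst1 전체 (뒤에 None 패딩, 중첩행렬용)
--         adn_i[2] 도 동일 구조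
--
--     기존 코드 대응:
--         chord_1_1_132  → adn_i[1][0]
--         adn_1_chord_1  → adn_i[1][1]  (chord_seq_1[32:], 5~132마디)
--         adn_1_chord_2  → adn_i[1][2]  ([16, *lag1, None])
--         adn_1_whole_c  → adn_i[1][-1] ([*chord_seq_1, *([None]*32)])
--     """
--     sp = solo_timepoints  # 32
--
--     # ── index 0: 전체 시퀀스 ──
--     # 기존: chord_1_1_132 = adn_1_chord.copy()
--     # 기존: chord_2_5_136 = [None, *adn_2_chord]
--     full_1 = list(chord_seq_1)          # inst1: 1~132마디
--     full_2 = [None] + list(chord_seq_2) # inst2: 5~136마디 (앞에 None 추가)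
--
--     # ── index 1: lag=1 시퀀스 (겹치는 구간, 5~132마디) ──
--     # 기존: adn_1_chord_1 = chord_1_1_132[32:]
--     # 기존: adn_2_chord_1 = chord_2_5_136[:-32]
--     lag1_1 = full_1[sp:]    # inst1 앞 4마디 제거
--     lag1_2 = full_2[:-sp]   # inst2 뒤 4마디 제거
--
--     # ── index 2~max_lag: 패딩 추가하며 확장 ──
--     # 기존 패턴:
--     #   adn_1_chord_k = [16, *adn_1_chord_{k-1}, None]
--     #   adn_2_chord_k = [None, *adn_2_chord_{k-1}, k-2]
--     seqs_1 = [full_1, lag1_1]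
--     seqs_2 = [full_2, lag1_2]
--
--     prev_1 = lag1_1
--     prev_2 = lag1_2
--     for lag in range(2, max_lag + 1):
--         curr_1 = [inst1_front_pad] + list(prev_1) + [None]
--         curr_2 = [None] + list(prev_2) + [lag - 2]  # 0, 1, 2 for lag 2, 3, 4
--         seqs_1.append(curr_1)
--         seqs_2.append(curr_2)
--         prev_1 = curr_1
--         prev_2 = curr_2
--
--     # ── index -1 (마지막): 전체 시퀀스 + None 패딩 (중첩행렬용) ──
--     # 기존: adn_1_whole_c = [*adn_1_chord, *([None] * 32)]
--     # 기존: adn_2_whole_c = [*([None] * 32), *chord_2_5_136]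
--     whole_1 = list(chord_seq_1) + [None] * sp
--     whole_2 = [None] * sp + list(full_2)  # full_2 = [None, *chord_seq_2]
--
--     # 길이 맞추기
--     max_len = max(len(whole_1), len(whole_2))
--     whole_1.extend([None] * (max_len - len(whole_1)))
--     whole_2.extend([None] * (max_len - len(whole_2)))
--
--     seqs_1.append(whole_1)
--     seqs_2.append(whole_2)
--
--     return {1: seqs_1, 2: seqs_2}
-- ===== SOURCE B (Python) =====
-- def prepare_lag_sequences(chord_seq_1: list, chord_seq_2: list,
--                           solo_timepoints: int = 32, max_lag: int = 4,
--                           inst1_front_pad: int = 16) -> dict: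
--     """Same result as A, but each lag-k row is built directly from k (closed
--     form) instead of threading prev_1/prev_2 through an accumulating loop."""
--     sp = solo_timepoints
--     full_1 = list(chord_seq_1)
--     full_2 = [None] + list(chord_seq_2)
--     lag1_1 = full_1[sp:]
--     lag1_2 = full_2[:-sp]
--
--     seqs_1 = [full_1, lag1_1] + [
--         [inst1_front_pad] * (k - 1) + lag1_1 + [None] * (k - 1)
--         for k in range(2, max_lag + 1)
--     ]
--     seqs_2 = [full_2, lag1_2] + [
--         [None] * (k - 1) + lag1_2 + list(range(k - 1))
--         for k in range(2, max_lag + 1)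
--     ]
--
--     whole_1 = list(chord_seq_1) + [None] * sp
--     whole_2 = [None] * sp + full_2
--     m = max(len(whole_1), len(whole_2))
--     whole_1 += [None] * (m - len(whole_1))
--     whole_2 += [None] * (m - len(whole_2))
--     seqs_1.append(whole_1)
--     seqs_2.append(whole_2)
--     return {1: seqs_1, 2: seqs_2}
-- ===== Notes on version B (the rewrite author's own statement) =====
-- stated objective: alternative
-- what changed: The accumulating lag loop that threads prev_1/prev_2 is replaced by a closed-form per-lag comprehension: row k is built directly as [pad]*(k-1)+lag1_1+[None]*(k-1) and [None]*(k-1)+lag1_2+list(range(k-1)), with no carried state.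
import Mathlib
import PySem

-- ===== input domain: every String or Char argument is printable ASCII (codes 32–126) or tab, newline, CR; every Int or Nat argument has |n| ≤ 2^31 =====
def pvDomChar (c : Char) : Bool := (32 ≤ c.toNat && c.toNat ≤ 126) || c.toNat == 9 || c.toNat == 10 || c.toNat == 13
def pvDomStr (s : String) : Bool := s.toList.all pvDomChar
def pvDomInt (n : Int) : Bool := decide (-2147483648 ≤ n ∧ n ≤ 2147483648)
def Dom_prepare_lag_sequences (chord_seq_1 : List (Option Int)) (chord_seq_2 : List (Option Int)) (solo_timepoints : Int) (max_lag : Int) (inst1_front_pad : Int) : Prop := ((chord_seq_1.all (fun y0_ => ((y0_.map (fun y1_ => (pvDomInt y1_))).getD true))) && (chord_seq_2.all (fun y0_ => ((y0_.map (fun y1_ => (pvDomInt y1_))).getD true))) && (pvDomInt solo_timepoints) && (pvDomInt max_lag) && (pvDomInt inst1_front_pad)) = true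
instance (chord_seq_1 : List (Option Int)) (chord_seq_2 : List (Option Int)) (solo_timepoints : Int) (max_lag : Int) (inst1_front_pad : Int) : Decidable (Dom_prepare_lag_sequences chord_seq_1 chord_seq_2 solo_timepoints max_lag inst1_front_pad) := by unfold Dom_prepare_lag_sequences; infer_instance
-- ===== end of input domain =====

-- B replaces A's accumulating lag loop (threading prev_1/prev_2) by a closed-form per-lag
-- construction; same outputs, same cost (objective: alternative).

-- ===== PORT A =====
-- literal transliteration of A: the lag loop is a foldl carrying (seqs_1, seqs_2, prev_1, prev_2)
def prepare_lag_sequences (chord_seq_1 : List (Option Int)) (chord_seq_2 : List (Option Int)) (solo_timepoints : Int) (max_lag : Int) (inst1_front_pad : Int) : List (Int × List (List (Option Int))) :=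
  let sp := solo_timepoints
  let full_1 : List (Option Int) := chord_seq_1
  let full_2 : List (Option Int) := none :: chord_seq_2
  let lag1_1 := PySem.List.slice full_1 (some sp) none
  let lag1_2 := PySem.List.slice full_2 none (some (-sp))
  let st :=
    (PySem.List.pyRange 2 (max_lag + 1) 1).foldl
      (fun (st : List (List (Option Int)) × List (List (Option Int)) × List (Option Int) × List (Option Int)) lag =>
        let curr_1 : List (Option Int) := some inst1_front_pad :: st.2.2.1 ++ [none]
        let curr_2 : List (Option Int) := none :: st.2.2.2 ++ [some (lag - 2)]
        (st.1 ++ [curr_1], st.2.1 ++ [curr_2], curr_1, curr_2))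
      ([full_1, lag1_1], [full_2, lag1_2], lag1_1, lag1_2)
  let whole_1 := chord_seq_1 ++ List.replicate sp.toNat (none : Option Int)
  let whole_2 := List.replicate sp.toNat (none : Option Int) ++ full_2
  let max_len := max whole_1.length whole_2.length
  let whole_1 := whole_1 ++ List.replicate (max_len - whole_1.length) (none : Option Int)
  let whole_2 := whole_2 ++ List.replicate (max_len - whole_2.length) (none : Option Int)
  [(1, st.1 ++ [whole_1]), (2, st.2.1 ++ [whole_2])]

-- ===== PORT B =====
-- literal transliteration of B: each lag-k row is built directly from k, no carried prev state
def prepare_lag_sequences_alt (chord_seq_1 : List (Option Int)) (chord_seq_2 : List (Option Int)) (solo_timepoints : Int) (max_lag : Int) (inst1_front_pad : Int) : List (Int × List (List (Option Int))) :=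
  let sp := solo_timepoints
  let full_1 : List (Option Int) := chord_seq_1
  let full_2 : List (Option Int) := none :: chord_seq_2
  let lag1_1 := PySem.List.slice full_1 (some sp) none
  let lag1_2 := PySem.List.slice full_2 none (some (-sp))
  let seqs_1 := [full_1, lag1_1] ++
    (PySem.List.pyRange 2 (max_lag + 1) 1).map (fun k =>
      List.replicate (k - 1).toNat (some inst1_front_pad) ++ lag1_1 ++
        List.replicate (k - 1).toNat (none : Option Int))
  let seqs_2 := [full_2, lag1_2] ++
    (PySem.List.pyRange 2 (max_lag + 1) 1).map (fun k =>
      List.replicate (k - 1).toNat (none : Option Int) ++ lag1_2 ++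
        (PySem.List.pyRange 0 (k - 1) 1).map (fun j => (some j : Option Int)))
  let whole_1 := chord_seq_1 ++ List.replicate sp.toNat (none : Option Int)
  let whole_2 := List.replicate sp.toNat (none : Option Int) ++ full_2
  let m := max whole_1.length whole_2.length
  let whole_1 := whole_1 ++ List.replicate (m - whole_1.length) (none : Option Int)
  let whole_2 := whole_2 ++ List.replicate (m - whole_2.length) (none : Option Int)
  [(1, seqs_1 ++ [whole_1]), (2, seqs_2 ++ [whole_2])]

-- ===== PRECONDITION & SPEC =====
def Spec_prepare_lag_sequences (chord_seq_1 : List (Option Int)) (chord_seq_2 : List (Option Int)) (solo_timepoints : Int) (max_lag : Int) (inst1_front_pad : Int) (out : List (Int × List (List (Option Int)))) : Prop := out = prepare_lag_sequences_alt chord_seq_1 chord_seq_2 solo_timepoints max_lag inst1_front_pad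
instance (chord_seq_1 : List (Option Int)) (chord_seq_2 : List (Option Int)) (solo_timepoints : Int) (max_lag : Int) (inst1_front_pad : Int) (out : List (Int × List (List (Option Int)))) : Decidable (Spec_prepare_lag_sequences chord_seq_1 chord_seq_2 solo_timepoints max_lag inst1_front_pad out) := by unfold Spec_prepare_lag_sequences; infer_instance

-- ===== CLAIM (what is proved, stated in full; the proofs are below) =====
def Claim_equal_prepare_lag_sequences : Prop := ∀ (chord_seq_1 : List (Option Int)) (chord_seq_2 : List (Option Int)) (solo_timepoints : Int) (max_lag : Int) (inst1_front_pad : Int), Dom_prepare_lag_sequences chord_seq_1 chord_seq_2 solo_timepoints max_lag inst1_front_pad → Spec_prepare_lag_sequences chord_seq_1 chord_seq_2 solo_timepoints max_lag inst1_front_pad (prepare_lag_sequences chord_seq_1 chord_seq_2 solo_timepoints max_lag inst1_front_pad)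

-- ===== LEMMAS AND PROOFS =====

-- A's loop after processing lags 2..(2+n-1): appended rows are B's closed forms, and the
-- carried prev pair is the closed form at stage n.
theorem loop_closed_form (pad : Int) (p q : List (Option Int))
    (a1 a2 : List (List (Option Int))) (n : Nat) :
    (PySem.List.pyRange 2 (2 + (n : Int)) 1).foldl
      (fun (st : List (List (Option Int)) × List (List (Option Int)) × List (Option Int) × List (Option Int)) lag =>
        let curr_1 : List (Option Int) := some pad :: st.2.2.1 ++ [none]
        let curr_2 : List (Option Int) := none :: st.2.2.2 ++ [some (lag - 2)]
        (st.1 ++ [curr_1], st.2.1 ++ [curr_2], curr_1, curr_2))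
      (a1, a2, p, q)
    = (a1 ++ (PySem.List.pyRange 2 (2 + (n : Int)) 1).map (fun k =>
          List.replicate (k - 1).toNat (some pad) ++ p ++
            List.replicate (k - 1).toNat (none : Option Int)),
       a2 ++ (PySem.List.pyRange 2 (2 + (n : Int)) 1).map (fun k =>
          List.replicate (k - 1).toNat (none : Option Int) ++ q ++
            (PySem.List.pyRange 0 (k - 1) 1).map (fun j => (some j : Option Int))),
       List.replicate n (some pad) ++ p ++ List.replicate n (none : Option Int),
       List.replicate n (none : Option Int) ++ q ++
         (PySem.List.pyRange 0 (n : Int) 1).map (fun j => (some j : Option Int))) := by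
  induction n with
  | zero =>
      simp [PySem.List.pyRange_one_eq_nil (by omega : (0:Int) ≤ 0)]
  | succ n ih =>
      have hsplit : PySem.List.pyRange 2 (2 + ((n + 1 : Nat) : Int)) 1
          = PySem.List.pyRange 2 (2 + (n : Int)) 1 ++ [2 + (n : Int)] := by
        have := PySem.List.pyRange_one_succ_right (a := 2) (b := 2 + (n : Int)) (by omega)
        push_cast
        convert this using 2
      rw [hsplit, List.foldl_append, ih]
      have h1 : ((2 : Int) + (n : Int) - 1).toNat = n + 1 := by omega
      have h2 : (2 : Int) + (n : Int) - 2 = (n : Int) := by ring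
      simp only [List.foldl_cons, List.foldl_nil, List.map_append, List.map_cons, List.map_nil,
        h1, h2]
      have h3 : (2 : Int) + (n : Int) - 1 = (((n + 1 : Nat) : Nat) : Int) := by push_cast; ring
      refine Prod.ext ?_ (Prod.ext ?_ (Prod.ext ?_ ?_)) <;>
        simp [h3, PySem.List.pyRange_one_succ_right (a := 0) (b := (n : Int)) (by omega),
          List.replicate_succ, ← List.replicate_succ', List.append_assoc]

-- A's range of lags, written with the bound 2 + (max_lag - 1).toNat when the loop runs at all.
theorem range_bound_eq (max_lag : Int) (h : 2 ≤ max_lag) :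
    max_lag + 1 = 2 + (((max_lag - 1).toNat : Nat) : Int) := by omega

-- ===== VERDICT (by name: the statement is the Claim_ definition above) =====
theorem prepare_lag_sequences_spec : Claim_equal_prepare_lag_sequences := by
  intro cs1 cs2 sp ml pad _
  unfold Spec_prepare_lag_sequences prepare_lag_sequences prepare_lag_sequences_alt
  by_cases h : 2 ≤ ml
  · rw [range_bound_eq ml h]
    simp only [loop_closed_form]
  · have hnil : PySem.List.pyRange 2 (ml + 1) 1 = [] :=
      PySem.List.pyRange_one_eq_nil (by omega)
    simp [hnil]
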